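-- pv_equiv track=rewrite | github.com/y9c/cutseq | cutseq/common.py | remove_fq_suffix
-- ===== SOURCE A (Python) =====
-- def remove_fq_suffix(f):
--     """
--     Removes common FASTQ file extensions from a filename.
--
--     This function attempts to remove suffixes like '_R1.fastq.gz', '.fq', etc.,
--     to derive a base filename. It prioritizes longer, more specific suffixes.
--
--     :param f: The input filename string.
--     :type f: str
--     :return: The filename with standard FASTQ suffixes removed.
--     :rtype: str
--     :Example:
--         >>> remove_fq_suffix("my_sample_R1.fastq.gz")
--         'my_sample'
--         >>> remove_fq_suffix("another_file.fq")
--         'another_file'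
--         >>> remove_fq_suffix("no_suffix_here")
--         'no_suffix_here'
--     """
--     suffixes = [
--         f"{base}.{ext}"
--         for ext in ["fastq.gz", "fq.gz", "fastq", "fq"]
--         for base in ["_R1_001", "_R2_001", "_R1", "_R2", ""]
--     ]
--
--     for suffix in suffixes:
--         if f.endswith(suffix):
--             return f.removesuffix(suffix)
--     return f
-- ===== SOURCE B (Python) =====
-- def remove_fq_suffix(f):
--     exts = ["fastq.gz", "fq.gz", "fastq", "fq"]
--     stem = None
--     for ext in exts:
--         if f.endswith("." + ext):
--             stem = f.removesuffix("." + ext)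
--             break
--     if stem is None:
--         return f
--     for marker in ["_R1_001", "_R2_001", "_R1", "_R2"]:
--         if stem.endswith(marker):
--             return stem.removesuffix(marker)
--     return stem
-- ===== Notes on version B (the rewrite author's own statement) =====
-- stated objective: simpler
-- what changed: Replaces the single scan over 20 precomputed base+ext suffix combinations with two short guarded stages: first strip the dotted extension, then (only if one was stripped) strip the read-marker from the remainder.
import Mathlib
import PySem

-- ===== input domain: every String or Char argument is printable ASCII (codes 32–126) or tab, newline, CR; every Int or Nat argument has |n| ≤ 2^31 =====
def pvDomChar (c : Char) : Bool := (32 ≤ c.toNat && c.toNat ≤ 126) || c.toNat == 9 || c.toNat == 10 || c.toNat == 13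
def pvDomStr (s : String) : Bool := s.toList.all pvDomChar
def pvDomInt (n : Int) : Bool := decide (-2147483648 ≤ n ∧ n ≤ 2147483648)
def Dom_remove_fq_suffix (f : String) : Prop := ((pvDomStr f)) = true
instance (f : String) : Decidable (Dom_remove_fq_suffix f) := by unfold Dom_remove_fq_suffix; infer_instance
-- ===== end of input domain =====

-- B replaces A's single scan over 20 precomputed base+extension suffixes by two short
-- guarded stages (strip the dotted extension, then the read-marker); objective: simpler.

-- ===== PORT A =====
-- str.removesuffix ported by hand (PySem has no primitive for it): exact — Python returns
-- s[:len(s)-len(suf)] when s ends with suf, else s unchanged (total, no exception).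
def pvRemovesuffix (s suf : List Char) : List Char :=
  if PySem.Chars.endswith s suf then s.take (s.length - suf.length) else s

def pvBasesA : List (List Char) :=
  ["_R1_001".toList, "_R2_001".toList, "_R1".toList, "_R2".toList, []]

def pvExtsA : List (List Char) :=
  ["fastq.gz".toList, "fq.gz".toList, "fastq".toList, "fq".toList]

-- the comprehension: [f"{base}.{ext}" for ext in … for base in …]
def pvSuffixesA : List (List Char) :=
  pvExtsA.flatMap (fun ext => pvBasesA.map (fun base => base ++ '.' :: ext))

-- the for-loop over suffixes: first match returns f.removesuffix(suffix)
def pvLoopA (f : List Char) : List (List Char) → List Char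
  | [] => f
  | s :: rest => if PySem.Chars.endswith f s then pvRemovesuffix f s else pvLoopA f rest

def remove_fq_suffix (f : String) : String :=
  String.ofList (pvLoopA f.toList pvSuffixesA)

-- ===== PORT B =====
def pvExtsB : List (List Char) :=
  ["fastq.gz".toList, "fq.gz".toList, "fastq".toList, "fq".toList]

def pvMarkersB : List (List Char) :=
  ["_R1_001".toList, "_R2_001".toList, "_R1".toList, "_R2".toList]

-- first stage: first extension with f.endswith("."+ext), stripped; none if no match
def pvExtLoopB (f : List Char) : List (List Char) → Option (List Char)
  | [] => none
  | e :: rest =>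
      if PySem.Chars.endswith f ('.' :: e) then some (pvRemovesuffix f ('.' :: e))
      else pvExtLoopB f rest

-- second stage: strip the first matching read-marker from the stem
def pvMarkerLoopB (stem : List Char) : List (List Char) → List Char
  | [] => stem
  | m :: rest =>
      if PySem.Chars.endswith stem m then pvRemovesuffix stem m else pvMarkerLoopB stem rest

def remove_fq_suffix_alt (f : String) : String :=
  match pvExtLoopB f.toList pvExtsB with
  | none => f
  | some stem => String.ofList (pvMarkerLoopB stem pvMarkersB)

-- ===== PRECONDITION & SPEC =====
def Spec_remove_fq_suffix (f : String) (out : String) : Prop := out = remove_fq_suffix_alt f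
instance (f : String) (out : String) : Decidable (Spec_remove_fq_suffix f out) := by unfold Spec_remove_fq_suffix; infer_instance

-- ===== CLAIM (what is proved, stated in full; the proofs are below) =====
def Claim_equal_remove_fq_suffix : Prop := ∀ (f : String), Dom_remove_fq_suffix f → Spec_remove_fq_suffix f (remove_fq_suffix f)

-- ===== LEMMAS AND PROOFS =====

-- (b ++ e) is a suffix of (c ++ e) iff b is a suffix of c
theorem pv_suffix_append_right_iff (b e c : List Char) : (b ++ e) <:+ (c ++ e) ↔ b <:+ c := by
  constructor
  · rintro ⟨t, ht⟩
    rw [← List.append_assoc] at ht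
    exact ⟨t, List.append_cancel_right ht⟩
  · rintro ⟨t, ht⟩
    exact ⟨t, by rw [← ht, List.append_assoc]⟩

-- if f does not end with e, it does not end with b ++ e either
theorem pv_endswith_append_false (f b e : List Char)
    (h : PySem.Chars.endswith f e = false) : PySem.Chars.endswith f (b ++ e) = false := by
  rw [Bool.eq_false_iff] at h ⊢
  intro hbe
  exact h ((PySem.Chars.endswith_iff ..).mpr
    ((List.suffix_append b e).trans ((PySem.Chars.endswith_iff ..).mp hbe)))

-- with e a suffix of f: ends-with (b ++ e) ⟺ the e-stripped remainder ends with b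
theorem pv_endswith_append (f b e : List Char) (h : PySem.Chars.endswith f e = true) :
    PySem.Chars.endswith f (b ++ e) = PySem.Chars.endswith (pvRemovesuffix f e) b := by
  obtain ⟨c, hc⟩ := (PySem.Chars.endswith_iff ..).mp h
  have hstem : pvRemovesuffix f e = c := by
    subst hc
    simp [pvRemovesuffix, h]
  rw [hstem]
  subst hc
  rcases hb : PySem.Chars.endswith c b with _ | _
  · rw [Bool.eq_false_iff] at hb ⊢
    intro hbe
    exact hb ((PySem.Chars.endswith_iff ..).mpr
      ((pv_suffix_append_right_iff b e c).mp ((PySem.Chars.endswith_iff ..).mp hbe)))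
  · exact (PySem.Chars.endswith_iff ..).mpr
      ((pv_suffix_append_right_iff b e c).mpr ((PySem.Chars.endswith_iff ..).mp hb))

-- with e a suffix of f and b a suffix of the stripped remainder:
-- stripping (b ++ e) = stripping e then b
theorem pv_removesuffix_append (f b e : List Char) (h : PySem.Chars.endswith f e = true)
    (hb : PySem.Chars.endswith (pvRemovesuffix f e) b = true) :
    pvRemovesuffix f (b ++ e) = pvRemovesuffix (pvRemovesuffix f e) b := by
  obtain ⟨c, hc⟩ := (PySem.Chars.endswith_iff ..).mp h
  have hstem : pvRemovesuffix f e = c := by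
    subst hc
    simp [pvRemovesuffix, h]
  have hE := pv_endswith_append f b e h
  rw [hstem] at hE hb
  rw [pvRemovesuffix, pvRemovesuffix, hE, hstem, if_pos hb, if_pos hb]
  obtain ⟨t, ht⟩ := (PySem.Chars.endswith_iff ..).mp hb
  subst hc
  subst ht
  have h1 : ((t ++ b) ++ e).length - (b ++ e).length = t.length := by
    simp [List.length_append]
  have h2 : (t ++ b).length - b.length = t.length := by
    simp [List.length_append]
  rw [h1, h2, List.append_assoc, List.take_left, List.take_left]

-- A's five-combo block for extension e, when f ends with ".e": it behaves as B's marker loop on the stem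
theorem pv_blockA_hit (f e : List Char) (rest : List (List Char))
    (h : PySem.Chars.endswith f ('.' :: e) = true) :
    pvLoopA f (pvBasesA.map (fun b => b ++ '.' :: e) ++ rest)
      = pvMarkerLoopB (pvRemovesuffix f ('.' :: e)) pvMarkersB := by
  simp only [pvBasesA, pvMarkersB, List.map, List.cons_append, List.nil_append]
  rw [pvLoopA, pv_endswith_append f _ _ h, pvMarkerLoopB]
  by_cases hm1 : PySem.Chars.endswith (pvRemovesuffix f ('.' :: e)) "_R1_001".toList = true
  · rw [if_pos hm1, if_pos hm1, pv_removesuffix_append f _ _ h hm1]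
  rw [if_neg hm1, if_neg hm1]
  rw [pvLoopA, pv_endswith_append f _ _ h, pvMarkerLoopB]
  by_cases hm2 : PySem.Chars.endswith (pvRemovesuffix f ('.' :: e)) "_R2_001".toList = true
  · rw [if_pos hm2, if_pos hm2, pv_removesuffix_append f _ _ h hm2]
  rw [if_neg hm2, if_neg hm2]
  rw [pvLoopA, pv_endswith_append f _ _ h, pvMarkerLoopB]
  by_cases hm3 : PySem.Chars.endswith (pvRemovesuffix f ('.' :: e)) "_R1".toList = true
  · rw [if_pos hm3, if_pos hm3, pv_removesuffix_append f _ _ h hm3]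
  rw [if_neg hm3, if_neg hm3]
  rw [pvLoopA, pv_endswith_append f _ _ h, pvMarkerLoopB]
  by_cases hm4 : PySem.Chars.endswith (pvRemovesuffix f ('.' :: e)) "_R2".toList = true
  · rw [if_pos hm4, if_pos hm4, pv_removesuffix_append f _ _ h hm4]
  rw [if_neg hm4, if_neg hm4]
  rw [pvLoopA]
  simp only [pvMarkerLoopB, h, if_true]

-- A's five-combo block for extension e, when f does not end with ".e": skipped entirely
theorem pv_blockA_miss (f e : List Char) (rest : List (List Char))
    (h : PySem.Chars.endswith f ('.' :: e) = false) :
    pvLoopA f (pvBasesA.map (fun b => b ++ '.' :: e) ++ rest) = pvLoopA f rest := by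
  simp only [pvBasesA, List.map, List.cons_append, List.nil_append]
  rw [pvLoopA, pv_endswith_append_false f _ _ h]
  rw [if_neg (by simp), pvLoopA, pv_endswith_append_false f _ _ h]
  rw [if_neg (by simp), pvLoopA, pv_endswith_append_false f _ _ h]
  rw [if_neg (by simp), pvLoopA, pv_endswith_append_false f _ _ h]
  rw [if_neg (by simp), pvLoopA]
  simp only [h, Bool.false_eq_true, if_false]

theorem pvSuffixesA_blocks :
    pvSuffixesA =
      pvBasesA.map (fun b => b ++ '.' :: "fastq.gz".toList)
      ++ (pvBasesA.map (fun b => b ++ '.' :: "fq.gz".toList)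
      ++ (pvBasesA.map (fun b => b ++ '.' :: "fastq".toList)
      ++ (pvBasesA.map (fun b => b ++ '.' :: "fq".toList) ++ []))) := by
  simp [pvSuffixesA, pvExtsA]

-- ===== VERDICT (by name: the statement is the Claim_ definition above) =====
theorem remove_fq_suffix_spec : Claim_equal_remove_fq_suffix := by
  intro f _
  show remove_fq_suffix f = remove_fq_suffix_alt f
  rw [remove_fq_suffix, remove_fq_suffix_alt, pvSuffixesA_blocks, pvExtsB]
  by_cases h1 : PySem.Chars.endswith f.toList ('.' :: "fastq.gz".toList) = true
  · rw [pv_blockA_hit _ _ _ h1, pvExtLoopB, if_pos h1]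
  rw [Bool.not_eq_true] at h1
  rw [pv_blockA_miss _ _ _ h1, pvExtLoopB, if_neg (by simp only [Bool.not_eq_true]; exact h1)]
  by_cases h2 : PySem.Chars.endswith f.toList ('.' :: "fq.gz".toList) = true
  · rw [pv_blockA_hit _ _ _ h2, pvExtLoopB, if_pos h2]
  rw [Bool.not_eq_true] at h2
  rw [pv_blockA_miss _ _ _ h2, pvExtLoopB, if_neg (by simp only [Bool.not_eq_true]; exact h2)]
  by_cases h3 : PySem.Chars.endswith f.toList ('.' :: "fastq".toList) = true
  · rw [pv_blockA_hit _ _ _ h3, pvExtLoopB, if_pos h3]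
  rw [Bool.not_eq_true] at h3
  rw [pv_blockA_miss _ _ _ h3, pvExtLoopB, if_neg (by simp only [Bool.not_eq_true]; exact h3)]
  by_cases h4 : PySem.Chars.endswith f.toList ('.' :: "fq".toList) = true
  · rw [pv_blockA_hit _ _ _ h4, pvExtLoopB, if_pos h4]
  rw [Bool.not_eq_true] at h4
  rw [pv_blockA_miss _ _ _ h4, pvExtLoopB, if_neg (by simp only [Bool.not_eq_true]; exact h4)]
  rw [pvLoopA]
  exact String.ofList_toList
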